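-- pv_equiv track=rewrite | github.com/Timmi239/algorithms | A_/867.py | more_from_seattle
-- ===== SOURCE A (Python) =====
-- def more_from_seattle(cities):
--     from_seattle = 0
--     from_san = 0
--
--     current = cities[0]
--     for c in cities[1:]:
--         if current == c:
--             continue
--         if current == 'S':
--             from_seattle += 1
--         else:
--             from_san += 1
--         current = c
--
--     if from_seattle > from_san:
--         return 'YES'
--     return 'NO'
-- ===== SOURCE B (Python) =====
-- def more_from_seattle(cities):
--     runs = []
--     for c in cities:
--         if not runs or runs[-1] != c:
--             runs.append(c)
--     from_seattle = 0
--     from_san = 0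
--     for a, b in zip(runs, runs[1:]):
--         if a == 'S':
--             from_seattle += 1
--         else:
--             from_san += 1
--     return 'YES' if from_seattle > from_san else 'NO'
-- ===== Notes on version B (the rewrite author's own statement) =====
-- stated objective: alternative
-- what changed: A does one stateful scan carrying 'current' and two counters; B first collapses consecutive duplicates into a run sequence and then counts over adjacent run pairs with zip, so the transition counting is separated from the dedup.
import Mathlib
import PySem

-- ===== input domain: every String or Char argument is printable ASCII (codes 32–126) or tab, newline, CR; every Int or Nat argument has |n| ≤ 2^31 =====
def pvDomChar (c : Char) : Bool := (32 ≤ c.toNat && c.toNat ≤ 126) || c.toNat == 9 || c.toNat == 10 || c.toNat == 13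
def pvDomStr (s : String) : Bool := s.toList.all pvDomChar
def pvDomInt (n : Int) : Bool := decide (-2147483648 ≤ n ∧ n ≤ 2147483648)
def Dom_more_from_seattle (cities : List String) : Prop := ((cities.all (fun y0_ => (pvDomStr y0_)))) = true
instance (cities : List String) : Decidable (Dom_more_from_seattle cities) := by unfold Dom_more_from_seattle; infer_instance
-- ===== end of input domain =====

-- B replaces A's single stateful scan by run-compression followed by a pairwise pass (alternative decomposition, same cost).

-- ===== PORT A =====
def more_from_seattle (cities : List String) : String :=
  -- cities[0] raises IndexError on []; Pre_ excludes that input, so the default is never used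
  let current := (PySem.List.pyGet? cities 0).getD ""
  let st := (PySem.List.slice cities (some 1) none).foldl
      (fun (s : String × Int × Int) (c : String) =>
        if s.1 == c then s
        else if s.1 == "S" then (c, s.2.1 + 1, s.2.2)
        else (c, s.2.1, s.2.2 + 1)) (current, (0 : Int), (0 : Int))
  if st.2.1 > st.2.2 then "YES" else "NO"

-- ===== PORT B =====
def more_from_seattle_alt (cities : List String) : String :=
  let runs := cities.foldl
      (fun (rs : List String) (c : String) =>
        if rs.isEmpty || rs.getLast? != some c then rs ++ [c] else rs) []
  let cnt := (runs.zip (runs.drop 1)).foldl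
      (fun (s : Int × Int) (p : String × String) =>
        if p.1 == "S" then (s.1 + 1, s.2) else (s.1, s.2 + 1)) ((0 : Int), (0 : Int))
  if cnt.1 > cnt.2 then "YES" else "NO"

-- ===== PRECONDITION & SPEC =====
-- Pre_ excludes only the empty list, on which A raises IndexError at cities[0].
def Pre_more_from_seattle (cities : List String) : Prop := cities ≠ []
instance (cities : List String) : Decidable (Pre_more_from_seattle cities) := by unfold Pre_more_from_seattle; infer_instance
def pvWitness_more_from_seattle : List String := ["S", "P", "S"]

def Spec_more_from_seattle (cities : List String) (out : String) : Prop := out = more_from_seattle_alt cities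
instance (cities : List String) (out : String) : Decidable (Spec_more_from_seattle cities out) := by unfold Spec_more_from_seattle; infer_instance

-- ===== CLAIM (what is proved, stated in full; the proofs are below) =====
def Claim_equal_more_from_seattle : Prop := ∀ (cities : List String), Dom_more_from_seattle cities → Pre_more_from_seattle cities → Spec_more_from_seattle cities (more_from_seattle cities)

-- ===== LEMMAS AND PROOFS =====

-- run compression of cur :: rest (structural form used only by the proofs)
def pvRuns : String → List String → List String
  | cur, [] => [cur]
  | cur, c :: rest => if cur == c then pvRuns cur rest else cur :: pvRuns c rest

-- pair counts over adjacent elements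
def pvCnt : List String → Int × Int
  | a :: b :: rest =>
      let p := pvCnt (b :: rest)
      if a == "S" then (p.1 + 1, p.2) else (p.1, p.2 + 1)
  | _ => ((0 : Int), (0 : Int))

theorem pvRuns_ne_nil (cur : String) (l : List String) : pvRuns cur l ≠ [] := by
  cases l with
  | nil => simp [pvRuns]
  | cons c rest =>
      simp only [pvRuns]
      split
      · exact pvRuns_ne_nil cur rest
      · simp

-- pvCnt on a two-or-more element list
theorem pvCnt_cons (a b : String) (tl : List String) :
    pvCnt (a :: b :: tl) =
      (if a == "S" then ((pvCnt (b :: tl)).1 + 1, (pvCnt (b :: tl)).2)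
       else ((pvCnt (b :: tl)).1, (pvCnt (b :: tl)).2 + 1)) := by
  simp [pvCnt]

-- A's fold: the two counters equal pvCnt of the run sequence (shifted by the initial counters)
theorem foldA_eq (cur : String) (l : List String) (fs fn : Int) :
    (l.foldl (fun (s : String × Int × Int) (c : String) =>
        if s.1 == c then s
        else if s.1 == "S" then (c, s.2.1 + 1, s.2.2)
        else (c, s.2.1, s.2.2 + 1)) (cur, fs, fn)).2
    = (fs + (pvCnt (pvRuns cur l)).1, fn + (pvCnt (pvRuns cur l)).2) := by
  induction l generalizing cur fs fn with
  | nil => simp [pvRuns, pvCnt]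
  | cons c rest ih =>
      simp only [List.foldl_cons]
      by_cases h : cur == c
      · rw [if_pos h, show pvRuns cur (c :: rest) = pvRuns cur rest by simp [pvRuns, h]]
        exact ih cur fs fn
      · obtain ⟨b, tl, hb⟩ : ∃ b tl, pvRuns c rest = b :: tl := by
          cases hr : pvRuns c rest with
          | nil => exact absurd hr (pvRuns_ne_nil c rest)
          | cons b tl => exact ⟨b, tl, rfl⟩
        have hruns : pvRuns cur (c :: rest) = cur :: pvRuns c rest := by simp [pvRuns, h]
        rw [if_neg (by simpa using h), hruns, hb, pvCnt_cons]
        by_cases hs : cur == "S"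
        · rw [if_pos hs, if_pos hs, ih c (fs + 1) fn, hb]
          simp only [Prod.mk.injEq, and_true, true_and]
          ring
        · rw [if_neg (by simpa using hs), if_neg (by simpa using hs), ih c fs (fn + 1), hb]
          simp only [Prod.mk.injEq, and_true, true_and]
          ring

-- B's run-building fold, with a nonempty accumulator front ++ [cur], extends to front ++ pvRuns cur l
theorem foldB_runs (front : List String) (cur : String) (l : List String) :
    l.foldl (fun (rs : List String) (c : String) =>
        if rs.isEmpty || rs.getLast? != some c then rs ++ [c] else rs) (front ++ [cur])
    = front ++ pvRuns cur l := by
  induction l generalizing front cur with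
  | nil => simp [pvRuns]
  | cons c rest ih =>
      simp only [List.foldl_cons]
      have hne : (front ++ [cur]).isEmpty = false := by simp
      have hlast : (front ++ [cur]).getLast? = some cur := by simp
      by_cases h : cur == c
      · have hc : cur = c := by simpa using h
        subst hc
        simp only [hne, hlast, Bool.false_or]
        have : (some cur != some cur) = false := by simp
        rw [this, if_neg (by simp)]
        rw [ih front cur]
        simp [pvRuns]
      · have : (some cur != some c) = true := by simpa using h
        simp only [hne, hlast, this, Bool.false_or, if_pos rfl]
        rw [if_pos trivial]
        rw [ih (front ++ [cur]) c]
        simp [pvRuns, h]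

-- B's pairwise fold over zip equals pvCnt (shifted by the initial counters)
theorem foldB_cnt (runs : List String) (s n : Int) :
    (runs.zip (runs.drop 1)).foldl
      (fun (s : Int × Int) (p : String × String) =>
        if p.1 == "S" then (s.1 + 1, s.2) else (s.1, s.2 + 1)) (s, n)
    = (s + (pvCnt runs).1, n + (pvCnt runs).2) := by
  induction runs generalizing s n with
  | nil => simp [pvCnt]
  | cons a tl ih =>
      cases tl with
      | nil => simp [pvCnt]
      | cons b rest =>
          simp only [List.drop_one, List.tail_cons, List.zip_cons_cons, List.foldl_cons]
          by_cases h : a == "S"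
          · simp only [h, if_true]
            rw [show (b :: rest).zip rest = (b :: rest).zip ((b :: rest).drop 1) by simp]
            rw [ih (s + 1) n]
            simp [pvCnt, h]; omega
          · simp only [h, Bool.false_eq_true, if_false]
            rw [show (b :: rest).zip rest = (b :: rest).zip ((b :: rest).drop 1) by simp]
            rw [ih s (n + 1)]
            simp [pvCnt, h]; omega

-- ===== VERDICT (by name: the statement is the Claim_ definition above) =====
theorem more_from_seattle_spec : Claim_equal_more_from_seattle := by
  intro cities _ hpre
  unfold Spec_more_from_seattle more_from_seattle more_from_seattle_alt
  cases cities with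
  | nil => exact absurd rfl hpre
  | cons cur rest =>
      simp only [PySem.List.pyGet?_zero_cons, Option.getD_some, PySem.List.slice_from_one,
        List.tail_cons, List.foldl_cons]
      simp only [List.isEmpty_nil, Bool.true_or, if_true, List.nil_append]
      rw [show [cur] = ([] : List String) ++ [cur] by simp, foldB_runs [] cur rest]
      simp only [List.nil_append, foldB_cnt, foldA_eq]
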